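-- pv_equiv track=rewrite | github.com/thomascassidyzm/ssi-dashboard-v7 | archive/old_test_batches/phase5_batch2_s0301_s0500/create_agent_05_baskets.py | calc_distribution
-- ===== SOURCE A (Python) =====
-- def calc_distribution(phrases):
--     """Calculate 2-2-2-4 distribution from phrases."""
--     dist = {
--         "really_short_1_2": 0,
--         "quite_short_3": 0,
--         "longer_4_5": 0,
--         "long_6_plus": 0
--     }
--     for phrase in phrases:
--         count = phrase[3]
--         if count <= 2:
--             dist["really_short_1_2"] += 1
--         elif count == 3:
--             dist["quite_short_3"] += 1
--         elif count in [4, 5]: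
--             dist["longer_4_5"] += 1
--         else:
--             dist["long_6_plus"] += 1
--     return dist
-- ===== SOURCE B (Python) =====
-- def calc_distribution(phrases):
--     """Calculate 2-2-2-4 distribution from phrases."""
--     phrases = list(phrases)
--     really_short = sum(1 for p in phrases if p[3] <= 2)
--     quite_short = sum(1 for p in phrases if p[3] == 3)
--     longer = sum(1 for p in phrases if p[3] in (4, 5))
--     return {
--         "really_short_1_2": really_short,
--         "quite_short_3": quite_short,
--         "longer_4_5": longer,
--         "long_6_plus": len(phrases) - really_short - quite_short - longer,
--     }
-- ===== Notes on version B (the rewrite author's own statement) =====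
-- stated objective: alternative
-- what changed: Replaces the single branching loop over a mutable dict with four independent counting passes (three filtered counts plus the remainder len - others for the fall-through bucket), building the result dict once at the end.
import Mathlib
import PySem

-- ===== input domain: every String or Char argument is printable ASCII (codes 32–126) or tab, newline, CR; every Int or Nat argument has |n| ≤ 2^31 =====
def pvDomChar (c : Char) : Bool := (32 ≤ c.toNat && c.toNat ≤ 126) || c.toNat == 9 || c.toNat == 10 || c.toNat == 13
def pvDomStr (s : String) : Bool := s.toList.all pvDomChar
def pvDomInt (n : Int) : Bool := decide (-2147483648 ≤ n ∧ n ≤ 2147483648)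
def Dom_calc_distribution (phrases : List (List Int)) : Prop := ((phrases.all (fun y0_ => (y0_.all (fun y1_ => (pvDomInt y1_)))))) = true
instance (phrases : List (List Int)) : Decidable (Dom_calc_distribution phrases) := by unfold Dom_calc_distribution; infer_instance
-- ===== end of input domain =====

-- B replaces A's single branching loop over a mutable dict by four independent
-- counting passes (the last bucket as the remainder); equal on all inputs where
-- every phrase has an element at index 3 (otherwise Python A raises IndexError).

-- ===== PORT A =====
-- the loop of A: fold the phrases into the dict; `none` = the IndexError of phrase[3]
def calcGoA (d : PySem.Dict String Int) (phrases : List (List Int)) :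
    Option (PySem.Dict String Int) :=
  match phrases with
  | [] => some d
  | p :: rest =>
    match PySem.List.pyGet? p 3 with
    | none => none
    | some count =>
      if count ≤ 2 then
        calcGoA (d.modify "really_short_1_2" 0 (· + 1)) rest
      else if count = 3 then
        calcGoA (d.modify "quite_short_3" 0 (· + 1)) rest
      else if count = 4 ∨ count = 5 then
        calcGoA (d.modify "longer_4_5" 0 (· + 1)) rest
      else
        calcGoA (d.modify "long_6_plus" 0 (· + 1)) rest

def calc_distribution (phrases : List (List Int)) : List (String × Int) :=
  let dist : PySem.Dict String Int :=
    PySem.Dict.mk [("really_short_1_2", 0), ("quite_short_3", 0),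
                   ("longer_4_5", 0), ("long_6_plus", 0)]
  match calcGoA dist phrases with
  | some d => d.items
  | none => []   -- unreachable under Pre_: Python raises IndexError here

-- ===== PORT B =====
def predShort (p : List Int) : Bool :=
  match PySem.List.pyGet? p 3 with | some c => c ≤ 2 | none => false
def predThree (p : List Int) : Bool :=
  match PySem.List.pyGet? p 3 with | some c => c = 3 | none => false
def predFourFive (p : List Int) : Bool :=
  match PySem.List.pyGet? p 3 with | some c => c = 4 ∨ c = 5 | none => false

def calc_distribution_alt (phrases : List (List Int)) : List (String × Int) :=
  let really : Int := phrases.countP predShort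
  let quite : Int := phrases.countP predThree
  let longer : Int := phrases.countP predFourFive
  [("really_short_1_2", really), ("quite_short_3", quite),
   ("longer_4_5", longer),
   ("long_6_plus", PySem.List.len phrases - really - quite - longer)]

-- ===== PRECONDITION & SPEC =====
-- Pre_ excludes exactly the inputs where Python A raises IndexError on phrase[3]
def Pre_calc_distribution (phrases : List (List Int)) : Prop :=
  ∀ p ∈ phrases, 4 ≤ p.length
instance (phrases : List (List Int)) : Decidable (Pre_calc_distribution phrases) := by
  unfold Pre_calc_distribution; infer_instance

def pvWitness_calc_distribution : List (List Int) :=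
  [[1, 2, 3, 2], [0, 0, 0, 3], [0, 0, 0, 5], [0, 0, 0, 9]]

def Spec_calc_distribution (phrases : List (List Int)) (out : List (String × Int)) : Prop :=
  out = calc_distribution_alt phrases
instance (phrases : List (List Int)) (out : List (String × Int)) :
    Decidable (Spec_calc_distribution phrases out) := by
  unfold Spec_calc_distribution; infer_instance

-- ===== CLAIM (what is proved, stated in full; the proofs are below) =====
def Claim_equal_calc_distribution : Prop :=
  ∀ (phrases : List (List Int)), Dom_calc_distribution phrases →
    Pre_calc_distribution phrases →
    Spec_calc_distribution phrases (calc_distribution phrases)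

-- ===== LEMMAS AND PROOFS =====

lemma calcGoA_spec (l : List (List Int)) (h : ∀ p ∈ l, 4 ≤ p.length)
    (a b c d : Int) :
    calcGoA (PySem.Dict.mk [("really_short_1_2", a), ("quite_short_3", b),
                            ("longer_4_5", c), ("long_6_plus", d)]) l =
      some (PySem.Dict.mk
        [("really_short_1_2", a + l.countP predShort),
         ("quite_short_3", b + l.countP predThree),
         ("longer_4_5", c + l.countP predFourFive),
         ("long_6_plus", d + (PySem.List.len l - l.countP predShort
            - l.countP predThree - l.countP predFourFive))]) := by
  induction l generalizing a b c d with
  | nil => simp [calcGoA, PySem.List.len]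
  | cons p rest ih =>
    have hp : 4 ≤ p.length := h p (by simp)
    have hget : PySem.List.pyGet? p 3 = some p[3] := by
      have := PySem.List.pyGet?_ofNat p (n := 3) (by omega)
      simpa using this
    have hrest : ∀ q ∈ rest, 4 ≤ q.length := fun q hq => h q (by simp [hq])
    simp only [calcGoA, hget]
    by_cases h1 : p[3] ≤ 2
    · have h2 : ¬ p[3] = 3 := by omega
      have h3 : ¬ (p[3] = 4 ∨ p[3] = 5) := by omega
      rw [if_pos h1]
      have hm : (PySem.Dict.mk [("really_short_1_2", a), ("quite_short_3", b),
            ("longer_4_5", c), ("long_6_plus", d)]).modify "really_short_1_2" 0 (· + 1)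
          = PySem.Dict.mk [("really_short_1_2", a + 1), ("quite_short_3", b),
            ("longer_4_5", c), ("long_6_plus", d)] := by rfl
      rw [hm, ih hrest]
      simp [predShort, predThree, predFourFive, hget, h1, h2, h3, PySem.List.len]
      omega
    · rw [if_neg h1]
      by_cases h2 : p[3] = 3
      · have h3 : ¬ (p[3] = 4 ∨ p[3] = 5) := by omega
        rw [if_pos h2]
        have hm : (PySem.Dict.mk [("really_short_1_2", a), ("quite_short_3", b),
              ("longer_4_5", c), ("long_6_plus", d)]).modify "quite_short_3" 0 (· + 1)
            = PySem.Dict.mk [("really_short_1_2", a), ("quite_short_3", b + 1),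
              ("longer_4_5", c), ("long_6_plus", d)] := by rfl
        rw [hm, ih hrest]
        simp [predShort, predThree, predFourFive, hget, h2, PySem.List.len]
        omega
      · rw [if_neg h2]
        by_cases h3 : p[3] = 4 ∨ p[3] = 5
        · rw [if_pos h3]
          have hm : (PySem.Dict.mk [("really_short_1_2", a), ("quite_short_3", b),
                ("longer_4_5", c), ("long_6_plus", d)]).modify "longer_4_5" 0 (· + 1)
              = PySem.Dict.mk [("really_short_1_2", a), ("quite_short_3", b),
                ("longer_4_5", c + 1), ("long_6_plus", d)] := by rfl
          rw [hm, ih hrest]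
          simp [predShort, predThree, predFourFive, hget, h1, h2, h3, PySem.List.len]
          omega
        · rw [if_neg h3]
          have hm : (PySem.Dict.mk [("really_short_1_2", a), ("quite_short_3", b),
                ("longer_4_5", c), ("long_6_plus", d)]).modify "long_6_plus" 0 (· + 1)
              = PySem.Dict.mk [("really_short_1_2", a), ("quite_short_3", b),
                ("longer_4_5", c), ("long_6_plus", d + 1)] := by rfl
          rw [hm, ih hrest]
          simp [predShort, predThree, predFourFive, hget, h1, h2, h3, PySem.List.len]
          omega

-- ===== VERDICT (by name: the statement is the Claim_ definition above) =====
theorem calc_distribution_spec : Claim_equal_calc_distribution := by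
  intro phrases _ hpre
  unfold Spec_calc_distribution
  simp only [calc_distribution, calc_distribution_alt,
    calcGoA_spec phrases hpre 0 0 0 0]
  simp
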